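-- pv_equiv track=rewrite | github.com/jjoshua2/arc_agi | unsolved/2025-10-11T14-25-30Z/50846271_best1.py | transform
-- ===== SOURCE A (Python) =====
-- def transform(grid: list[list[int]]) -> list[list[int]]:
--     if not grid or not grid[0]:
--         return [row[:] for row in grid]
--     h, w = len(grid), len(grid[0])
--     # Work on a copy for the result
--     out = [row[:] for row in grid]
--
--     to_fill = set()  # coordinates to recolor to 8
--
--     # Helper to check if all cells in a row segment are 5
--     def all_five_row(r: int, c1: int, c2: int) -> bool:
--         # assumes c1 < c2
--         for c in range(c1 + 1, c2):
--             if grid[r][c] != 5: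
--                 return False
--         return True
--
--     # Helper to check if all cells in a column segment are 5
--     def all_five_col(c: int, r1: int, r2: int) -> bool:
--         # assumes r1 < r2
--         for r in range(r1 + 1, r2):
--             if grid[r][c] != 5:
--                 return False
--         return True
--
--     # Process rows: fill gaps of 5s between consecutive red (2) cells
--     for r in range(h):
--         red_cols = [c for c in range(w) if grid[r][c] == 2]
--         for i in range(len(red_cols) - 1):
--             c1, c2 = red_cols[i], red_cols[i + 1]
--             if c2 - c1 > 1 and all_five_row(r, c1, c2):
--                 for c in range(c1 + 1, c2):
--                     to_fill.add((r, c))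
--
--     # Process columns: fill gaps of 5s between consecutive red (2) cells
--     for c in range(w):
--         red_rows = [r for r in range(h) if grid[r][c] == 2]
--         for i in range(len(red_rows) - 1):
--             r1, r2 = red_rows[i], red_rows[i + 1]
--             if r2 - r1 > 1 and all_five_col(c, r1, r2):
--                 for r in range(r1 + 1, r2):
--                     to_fill.add((r, c))
--
--     # Apply fills
--     for r, c in to_fill:
--         # Only 5s turn to 8; other cells stay as they are
--         if out[r][c] == 5:
--             out[r][c] = 8
--
--     return out
-- ===== SOURCE B (Python) =====
-- def transform(grid: list[list[int]]) -> list[list[int]]: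
--     if not grid or not grid[0]:
--         return [row[:] for row in grid]
--     h, w = len(grid), len(grid[0])
--
--     # A cell becomes 8 iff it is a 5 whose nearest non-5 neighbours on both
--     # sides (horizontally, or vertically) exist and are red (2).
--     def filled(r: int, c: int) -> bool:
--         if grid[r][c] != 5:
--             return False
--         c1 = c - 1
--         while c1 >= 0 and grid[r][c1] == 5:
--             c1 -= 1
--         c2 = c + 1
--         while c2 < w and grid[r][c2] == 5:
--             c2 += 1
--         if c1 >= 0 and grid[r][c1] == 2 and c2 < w and grid[r][c2] == 2:
--             return True
--         r1 = r - 1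
--         while r1 >= 0 and grid[r1][c] == 5:
--             r1 -= 1
--         r2 = r + 1
--         while r2 < h and grid[r2][c] == 5:
--             r2 += 1
--         return r1 >= 0 and grid[r1][c] == 2 and r2 < h and grid[r2][c] == 2
--
--     return [[8 if filled(r, c) else grid[r][c] for c in range(w)] + grid[r][w:]
--             for r in range(h)]
-- ===== Notes on version B (the rewrite author's own statement) =====
-- stated objective: simpler
-- what changed: B decides each cell independently by probing its nearest non-5 neighbour on each side of the row and of the column (fill iff both are red), instead of collecting red positions per line, re-scanning each adjacent red pair's segment, accumulating a coordinate set and applying it at the end.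
import Mathlib
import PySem

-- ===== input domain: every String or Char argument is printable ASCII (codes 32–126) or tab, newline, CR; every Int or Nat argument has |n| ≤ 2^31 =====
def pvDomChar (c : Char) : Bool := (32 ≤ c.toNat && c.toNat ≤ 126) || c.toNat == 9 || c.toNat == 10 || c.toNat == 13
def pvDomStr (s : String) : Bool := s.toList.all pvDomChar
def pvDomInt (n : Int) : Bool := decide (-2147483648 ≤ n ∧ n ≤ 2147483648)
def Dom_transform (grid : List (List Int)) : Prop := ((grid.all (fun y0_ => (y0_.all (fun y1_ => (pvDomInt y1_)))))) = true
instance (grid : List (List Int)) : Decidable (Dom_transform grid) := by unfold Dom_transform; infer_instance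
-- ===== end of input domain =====

-- B replaces A's "collect red column/row lists, re-scan each adjacent segment, accumulate a
-- coordinate set, then apply it" scheme by a direct per-cell rule: a cell becomes 8 iff it is a 5
-- whose nearest non-5 neighbour on each side (horizontally, or vertically) exists and is a 2.
-- Objective: simpler (no position lists, no segment bookkeeping, no coordinate set).

-- ===== PORT A =====

-- grid[r][c] for indices produced by range(...): always in range under Pre_ (getD default unreachable there)
def pvCell (g : List (List Int)) (r c : Nat) : Int := (g.getD r []).getD c 0

-- out[r][c] = v
def pvSetCell (g : List (List Int)) (r c : Nat) (v : Int) : List (List Int) :=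
  g.modify r (fun row => row.set c v)

-- helper all_five_row: range(c1+1, c2) is List.range' (c1+1) (c2-(c1+1))
def allFiveRowA (g : List (List Int)) (r c1 c2 : Nat) : Bool :=
  (List.range' (c1 + 1) (c2 - (c1 + 1))).all (fun c => pvCell g r c == 5)

-- helper all_five_col
def allFiveColA (g : List (List Int)) (c r1 r2 : Nat) : Bool :=
  (List.range' (r1 + 1) (r2 - (r1 + 1))).all (fun r => pvCell g r c == 5)

-- the row pass: "for i in range(len(red_cols)-1)" iterates exactly the adjacent pairs, i.e. zip with tail
def rowFillsA (g : List (List Int)) (h w : Nat) (s : PySem.Set (Nat × Nat)) : PySem.Set (Nat × Nat) :=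
  (List.range h).foldl (fun s r =>
    let reds := (List.range w).filter (fun c => pvCell g r c == 2)
    (reds.zip reds.tail).foldl (fun s p =>
      if p.2 - p.1 > 1 && allFiveRowA g r p.1 p.2 then
        (List.range' (p.1 + 1) (p.2 - (p.1 + 1))).foldl (fun s c => PySem.Set.add s (r, c)) s
      else s) s) s

-- the column pass
def colFillsA (g : List (List Int)) (h w : Nat) (s : PySem.Set (Nat × Nat)) : PySem.Set (Nat × Nat) :=
  (List.range w).foldl (fun s c =>
    let reds := (List.range h).filter (fun r => pvCell g r c == 2)
    (reds.zip reds.tail).foldl (fun s p =>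
      if p.2 - p.1 > 1 && allFiveColA g c p.1 p.2 then
        (List.range' (p.1 + 1) (p.2 - (p.1 + 1))).foldl (fun s r => PySem.Set.add s (r, c)) s
      else s) s) s

def transform (grid : List (List Int)) : List (List Int) :=
  match grid with
  | [] => []
  | g0 :: _ =>
    if g0.isEmpty then grid
    else
      let h := grid.length
      let w := g0.length
      let toFill := colFillsA grid h w (rowFillsA grid h w PySem.Set.empty)
      -- "for r, c in to_fill: if out[r][c] == 5: out[r][c] = 8" — each coordinate occurs once
      -- (a Python set), and each write touches only its own cell, so the result is iteration-order
      -- independent; we fold over the Set's element list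
      toFill.foldl (fun out p =>
        if pvCell out p.1 p.2 == 5 then pvSetCell out p.1 p.2 8 else out) grid

-- ===== PORT B =====

-- "i := c-1; while i >= 0 and f(i) == 5: i -= 1": first index below c with value ≠ 5 (none = fell off)
def scanLow (f : Nat → Int) : Nat → Option Nat
  | 0 => none
  | k + 1 => if f k == 5 then scanLow f k else some k

-- "i := c; while i < n and f(i) == 5: i += 1": first index ≥ c, < n with value ≠ 5 (none = fell off)
def scanHigh (f : Nat → Int) (n : Nat) (c : Nat) : Option Nat :=
  if _h : c < n then (if f c == 5 then scanHigh f n (c + 1) else some c) else none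
  termination_by n - c
  decreasing_by omega

def filledB (g : List (List Int)) (h w r c : Nat) : Bool :=
  if pvCell g r c == 5 then
    (match scanLow (fun k => pvCell g r k) c, scanHigh (fun k => pvCell g r k) w (c + 1) with
     | some c1, some c2 => pvCell g r c1 == 2 && pvCell g r c2 == 2
     | _, _ => false) ||
    (match scanLow (fun k => pvCell g k c) r, scanHigh (fun k => pvCell g k c) h (r + 1) with
     | some r1, some r2 => pvCell g r1 c == 2 && pvCell g r2 c == 2
     | _, _ => false)
  else false

def transform_alt (grid : List (List Int)) : List (List Int) :=
  match grid with
  | [] => []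
  | g0 :: _ =>
    if g0.isEmpty then grid
    else
      let h := grid.length
      let w := g0.length
      (List.range h).map (fun r =>
        ((List.range w).map (fun c => if filledB grid h w r c then 8 else pvCell grid r c))
          ++ (grid.getD r []).drop w)   -- row[w:]: w ≥ 0, so the slice is List.drop

-- ===== PRECONDITION & SPEC =====

-- A raises IndexError exactly when some row is shorter than the first row (and B raises there too);
-- Pre_ excludes exactly those inputs.
def Pre_transform (grid : List (List Int)) : Prop :=
  ∀ row ∈ grid, (grid.headD []).length ≤ row.length
instance (grid : List (List Int)) : Decidable (Pre_transform grid) := by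
  unfold Pre_transform; infer_instance

def pvWitness_transform : List (List Int) := [[2, 5, 2], [5, 5, 5], [2, 5, 2]]

def Spec_transform (grid : List (List Int)) (out : List (List Int)) : Prop := out = transform_alt grid
instance (grid : List (List Int)) (out : List (List Int)) : Decidable (Spec_transform grid out) := by
  unfold Spec_transform; infer_instance

-- ===== CLAIM (what is proved, stated in full; the proofs are below) =====
def Claim_equal_transform : Prop := ∀ (grid : List (List Int)), Dom_transform grid → Pre_transform grid → Spec_transform grid (transform grid)

-- ===== LEMMAS AND PROOFS =====

-- the one-dimensional fill condition both programs implement on every grid line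
def LineFill (f : Nat → Int) (n c : Nat) : Prop :=
  ∃ a b, a < c ∧ c < b ∧ b < n ∧ f a = 2 ∧ f b = 2 ∧ ∀ k, a < k → k < b → f k = 5

lemma lineFill_cell5 {f : Nat → Int} {n c : Nat} (h : LineFill f n c) : f c = 5 := by
  obtain ⟨a, b, h1, h2, _, _, _, h6⟩ := h
  exact h6 c h1 h2

lemma scanLow_eq_some_iff {f : Nat → Int} {c j : Nat} :
    scanLow f c = some j ↔ j < c ∧ f j ≠ 5 ∧ ∀ k, j < k → k < c → f k = 5 := by
  induction c with
  | zero => simp [scanLow]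
  | succ c ih =>
    rw [scanLow]
    by_cases h5 : f c = 5
    · simp only [h5, beq_self_eq_true, if_true, ih]
      constructor
      · rintro ⟨h1, h2, h3⟩
        exact ⟨by omega, h2, fun k hk1 hk2 => by
          rcases Nat.lt_succ_iff_lt_or_eq.mp hk2 with h | h
          · exact h3 k hk1 h
          · subst h; exact h5⟩
      · rintro ⟨h1, h2, h3⟩
        refine ⟨by rcases Nat.lt_succ_iff_lt_or_eq.mp h1 with h | h; · exact h
                   · subst h; exact absurd h5 h2, h2, fun k hk1 hk2 => h3 k hk1 (by omega)⟩
    · simp only [beq_iff_eq, h5, if_false, Option.some.injEq]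
      constructor
      · rintro rfl; exact ⟨Nat.lt_succ_self _, h5, fun k hk1 hk2 => by omega⟩
      · rintro ⟨h1, h2, h3⟩
        by_contra hne
        have hjc : j < c := by omega
        exact h5 (h3 c hjc (Nat.lt_succ_self _))

lemma scanHigh_eq_some_iff {f : Nat → Int} {n c j : Nat} :
    scanHigh f n c = some j ↔ c ≤ j ∧ j < n ∧ f j ≠ 5 ∧ ∀ k, c ≤ k → k < j → f k = 5 := by
  induction hm : n - c using Nat.strong_induction_on generalizing c with
  | _ m ih =>
    rw [scanHigh]
    by_cases hcn : c < n
    · simp only [hcn, dif_pos]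
      by_cases h5 : f c = 5
      · rw [if_pos (by simpa using h5), ih (n - (c + 1)) (by omega) rfl]
        constructor
        · rintro ⟨h1, h2, h3, h4⟩
          exact ⟨by omega, h2, h3, fun k hk1 hk2 => by
            rcases Nat.lt_or_ge k (c + 1) with h | h
            · have : k = c := by omega
              subst this; exact h5
            · exact h4 k h hk2⟩
        · rintro ⟨h1, h2, h3, h4⟩
          refine ⟨?_, h2, h3, fun k hk1 hk2 => h4 k (by omega) hk2⟩
          rcases Nat.lt_or_ge j (c + 1) with h | h
          · have : j = c := by omega
            subst this; exact absurd h5 h3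
          · exact h
      · rw [if_neg (by simpa using h5)]
        simp only [Option.some.injEq]
        constructor
        · rintro rfl; exact ⟨le_refl _, hcn, h5, fun k hk1 hk2 => by omega⟩
        · rintro ⟨h1, h2, h3, h4⟩
          by_contra hne
          have : c < j := by omega
          exact h5 (h4 c (le_refl _) this)
    · simp only [hcn, dif_neg, not_false_iff]
      constructor
      · intro h; cases h
      · rintro ⟨h1, h2, _, _⟩; omega

lemma scanMatch_iff (f : Nat → Int) (n c : Nat) (h5 : f c = 5) :
    ((match scanLow f c, scanHigh f n (c + 1) with
      | some a, some b => f a == 2 && f b == 2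
      | _, _ => false) = true) ↔ LineFill f n c := by
  constructor
  · intro hm
    rcases hL : scanLow f c with _ | a <;> rcases hH : scanHigh f n (c + 1) with _ | b <;>
      rw [hL, hH] at hm
    · simp at hm
    · simp at hm
    · simp at hm
    have hab : f a = 2 ∧ f b = 2 := by simpa using hm
    obtain ⟨hac, _, hall⟩ := scanLow_eq_some_iff.mp hL
    obtain ⟨hcb, hbn, _, hall2⟩ := scanHigh_eq_some_iff.mp hH
    exact ⟨a, b, hac, by omega, hbn, hab.1, hab.2, fun k hk1 hk2 => by
      rcases Nat.lt_trichotomy k c with h | h | h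
      · exact hall k hk1 h
      · subst h; exact h5
      · exact hall2 k (by omega) hk2⟩
  · rintro ⟨a, b, hac, hcb, hbn, ha2, hb2, hall⟩
    have hL : scanLow f c = some a :=
      scanLow_eq_some_iff.mpr ⟨hac, by omega, fun k hk1 hk2 => hall k hk1 (by omega)⟩
    have hH : scanHigh f n (c + 1) = some b :=
      scanHigh_eq_some_iff.mpr ⟨by omega, hbn, by omega, fun k hk1 hk2 => hall k (by omega) hk2⟩
    rw [hL, hH]
    simp [ha2, hb2]

lemma filledB_iff (g : List (List Int)) (h w r c : Nat) :
    filledB g h w r c = true ↔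
      LineFill (fun k => pvCell g r k) w c ∨ LineFill (fun k => pvCell g k c) h r := by
  unfold filledB
  by_cases h5 : pvCell g r c = 5
  · rw [if_pos (by simpa using h5), Bool.or_eq_true,
      scanMatch_iff (fun k => pvCell g r k) w c h5,
      scanMatch_iff (fun k => pvCell g k c) h r h5]
  · rw [if_neg (by simpa using h5)]
    constructor
    · intro hf; cases hf
    · rintro (hf | hf)
      · exact absurd (lineFill_cell5 hf) h5
      · exact absurd (lineFill_cell5 hf) h5

-- adjacent pairs of a strictly sorted list
lemma zip_tail_mem_iff {l : List Nat} (hs : l.Pairwise (· < ·)) {a b : Nat} :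
    (a, b) ∈ l.zip l.tail ↔ a ∈ l ∧ b ∈ l ∧ a < b ∧ ∀ x ∈ l, ¬(a < x ∧ x < b) := by
  induction l with
  | nil => simp
  | cons x l ih =>
    cases l with
    | nil =>
      constructor
      · intro h; simp at h
      · rintro ⟨ha, hb, hab, -⟩
        simp only [List.mem_singleton] at ha hb
        exact absurd hab (by omega)
    | cons y l =>
      obtain ⟨hx, hs'⟩ := List.pairwise_cons.mp hs
      have hxy : x < y := hx y List.mem_cons_self
      have hyl : ∀ z ∈ l, y < z := (List.pairwise_cons.mp hs').1
      have ihy := ih hs'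
      simp only [List.tail_cons] at ihy ⊢
      rw [List.zip_cons_cons]
      constructor
      · intro hmem
        rcases List.mem_cons.mp hmem with heq | hmem'
        · obtain ⟨rfl, rfl⟩ : a = x ∧ b = y :=
            ⟨congrArg Prod.fst heq, congrArg Prod.snd heq⟩
          refine ⟨List.mem_cons_self, List.mem_cons_of_mem _ List.mem_cons_self, hxy, ?_⟩
          rintro z hz ⟨h1, h2⟩
          rcases List.mem_cons.mp hz with rfl | hz'
          · omega
          · rcases List.mem_cons.mp hz' with rfl | hz''
            · omega
            · have := hyl z hz''
              omega
        · obtain ⟨ha, hb, hab, hno⟩ := ihy.mp hmem'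
          refine ⟨List.mem_cons_of_mem _ ha, List.mem_cons_of_mem _ hb, hab, ?_⟩
          intro z hz hzb
          rcases List.mem_cons.mp hz with rfl | hz'
          · have hya : y ≤ a := by
              rcases List.mem_cons.mp ha with rfl | ha'
              · omega
              · have := hyl a ha'; omega
            omega
          · exact hno z hz' hzb
      · rintro ⟨ha, hb, hab, hno⟩
        rcases List.mem_cons.mp ha with rfl | ha'
        · have hby : b = y := by
            rcases List.mem_cons.mp hb with rfl | hb'
            · omega
            · rcases List.mem_cons.mp hb' with rfl | hb''
              · rfl
              · have hyb := hyl b hb''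
                exact absurd ⟨hxy, hyb⟩ (hno y (List.mem_cons_of_mem _ List.mem_cons_self))
          subst hby
          exact List.mem_cons_self
        · have hb' : b ∈ y :: l := by
            rcases List.mem_cons.mp hb with rfl | hb'
            · have hya : y ≤ a := by
                rcases List.mem_cons.mp ha' with rfl | ha''
                · omega
                · have := hyl a ha''; omega
              omega
            · exact hb'
          exact List.mem_cons_of_mem _
            (ihy.mpr ⟨ha', hb', hab, fun z hz => hno z (List.mem_cons_of_mem _ hz)⟩)

lemma allFive_iff (f : Nat → Int) (a b : Nat) :
    ((List.range' (a + 1) (b - (a + 1))).all (fun k => f k == 5) = true) ↔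
      ∀ k, a < k → k < b → f k = 5 := by
  simp only [List.all_eq_true, List.mem_range'_1, beq_iff_eq]
  constructor
  · intro hA k h1 h2; exact hA k ⟨by omega, by omega⟩
  · rintro hA k ⟨h1, h2⟩; exact hA k (by omega) (by omega)

-- A's per-line pair iteration finds exactly LineFill
lemma lineFill_iff_exists_pair (f : Nat → Int) (n c : Nat) :
    LineFill f n c ↔
      ∃ p ∈ (((List.range n).filter (fun k => f k == 2)).zip
              ((List.range n).filter (fun k => f k == 2)).tail),
        (p.2 - p.1 > 1 && (List.range' (p.1 + 1) (p.2 - (p.1 + 1))).all (fun k => f k == 5)) = true ∧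
        c ∈ List.range' (p.1 + 1) (p.2 - (p.1 + 1)) := by
  have hsort : ((List.range n).filter (fun k => f k == 2)).Pairwise (· < ·) :=
    List.Pairwise.filter _ (List.pairwise_lt_range)
  have hmem : ∀ x : Nat, x ∈ (List.range n).filter (fun k => f k == 2) ↔ x < n ∧ f x = 2 := by
    intro x; simp [List.mem_filter, List.mem_range]
  constructor
  · rintro ⟨a, b, hac, hcb, hbn, ha2, hb2, hall⟩
    have hpair : (a, b) ∈ ((List.range n).filter (fun k => f k == 2)).zip
        ((List.range n).filter (fun k => f k == 2)).tail := by
      refine (zip_tail_mem_iff hsort).mpr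
        ⟨(hmem a).mpr ⟨by omega, ha2⟩, (hmem b).mpr ⟨hbn, hb2⟩, by omega, ?_⟩
      rintro x hx ⟨h1, h2⟩
      have hx2 := ((hmem x).mp hx).2
      have := hall x h1 h2
      omega
    refine ⟨(a, b), hpair, ?_, ?_⟩
    · rw [Bool.and_eq_true]
      exact ⟨decide_eq_true (by omega), (allFive_iff f a b).mpr hall⟩
    · exact List.mem_range'_1.mpr ⟨by omega, by omega⟩
  · rintro ⟨⟨a, b⟩, hpair, hcond, hcr⟩
    obtain ⟨ha, hb, hab, -⟩ := (zip_tail_mem_iff hsort).mp hpair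
    rw [Bool.and_eq_true] at hcond
    obtain ⟨hgap, hfive⟩ := hcond
    have hgap' : b - a > 1 := of_decide_eq_true hgap
    have hcr' := List.mem_range'_1.mp hcr
    exact ⟨a, b, by omega, by omega, ((hmem b).mp hb).1, ((hmem a).mp ha).2,
      ((hmem b).mp hb).2, (allFive_iff f a b).mp hfive⟩

-- membership through a fold whose step adds according to a predicate
lemma mem_foldl_step {α β : Type} (step : List α → β → List α) (P : β → α → Prop)
    (hstep : ∀ s b y, y ∈ step s b ↔ y ∈ s ∨ P b y) :
    ∀ (l : List β) (s : List α) (y : α), y ∈ l.foldl step s ↔ y ∈ s ∨ ∃ b ∈ l, P b y := by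
  intro l
  induction l with
  | nil => simp
  | cons b l ih =>
    intro s y
    rw [List.foldl_cons, ih, hstep]
    constructor
    · rintro ((h | h) | ⟨b', hb', h⟩)
      · exact Or.inl h
      · exact Or.inr ⟨b, List.mem_cons_self, h⟩
      · exact Or.inr ⟨b', List.mem_cons_of_mem _ hb', h⟩
    · rintro (h | ⟨b', hb', h⟩)
      · exact Or.inl (Or.inl h)
      · rcases List.mem_cons.mp hb' with rfl | hb'
        · exact Or.inl (Or.inr h)
        · exact Or.inr ⟨b', hb', h⟩

lemma mem_rowFillsA (g : List (List Int)) (h w : Nat) (s : PySem.Set (Nat × Nat)) (r c : Nat) :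
    (r, c) ∈ rowFillsA g h w s ↔
      (r, c) ∈ s ∨ (r < h ∧ LineFill (fun k => pvCell g r k) w c) := by
  have hstep2 : ∀ (r' : Nat) (s2 : List (Nat × Nat)) (p : Nat × Nat) (y : Nat × Nat),
      y ∈ (if p.2 - p.1 > 1 && allFiveRowA g r' p.1 p.2 then
            (List.range' (p.1 + 1) (p.2 - (p.1 + 1))).foldl (fun s c => PySem.Set.add s (r', c)) s2
          else s2) ↔
        y ∈ s2 ∨ ((p.2 - p.1 > 1 && allFiveRowA g r' p.1 p.2) = true ∧
          ∃ c' ∈ List.range' (p.1 + 1) (p.2 - (p.1 + 1)), y = (r', c')) := by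
    intro r' s2 p y
    by_cases hc : (p.2 - p.1 > 1 && allFiveRowA g r' p.1 p.2) = true
    · rw [if_pos hc, PySem.Set.mem_foldl_add]
      simp [hc]
    · rw [if_neg hc]
      simp [hc]
  have hstep1 : ∀ (s1 : List (Nat × Nat)) (r' : Nat) (y : Nat × Nat),
      y ∈ (let reds := (List.range w).filter (fun c => pvCell g r' c == 2)
           (reds.zip reds.tail).foldl (fun s p =>
             if p.2 - p.1 > 1 && allFiveRowA g r' p.1 p.2 then
               (List.range' (p.1 + 1) (p.2 - (p.1 + 1))).foldl (fun s c => PySem.Set.add s (r', c)) s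
             else s) s1) ↔
        y ∈ s1 ∨ ∃ p ∈ (((List.range w).filter (fun c => pvCell g r' c == 2)).zip
            ((List.range w).filter (fun c => pvCell g r' c == 2)).tail),
          ((p.2 - p.1 > 1 && allFiveRowA g r' p.1 p.2) = true ∧
            ∃ c' ∈ List.range' (p.1 + 1) (p.2 - (p.1 + 1)), y = (r', c')) := by
    intro s1 r' y
    exact mem_foldl_step _ _ (hstep2 r') _ s1 y
  unfold rowFillsA
  rw [mem_foldl_step _ _ hstep1 (List.range h) s (r, c)]
  constructor
  · rintro (hs | ⟨r', hr', p, hp, hcond, c', hc', heq⟩)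
    · exact Or.inl hs
    · obtain ⟨rfl, rfl⟩ : r = r' ∧ c = c' :=
        ⟨congrArg Prod.fst heq, congrArg Prod.snd heq⟩
      exact Or.inr ⟨List.mem_range.mp hr',
        (lineFill_iff_exists_pair (fun k => pvCell g r k) w c).mpr ⟨p, hp, hcond, hc'⟩⟩
  · rintro (hs | ⟨hrh, hLF⟩)
    · exact Or.inl hs
    · obtain ⟨p, hp, hcond, hc'⟩ :=
        (lineFill_iff_exists_pair (fun k => pvCell g r k) w c).mp hLF
      exact Or.inr ⟨r, List.mem_range.mpr hrh, p, hp, hcond, c, hc', rfl⟩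

lemma mem_colFillsA (g : List (List Int)) (h w : Nat) (s : PySem.Set (Nat × Nat)) (r c : Nat) :
    (r, c) ∈ colFillsA g h w s ↔
      (r, c) ∈ s ∨ (c < w ∧ LineFill (fun k => pvCell g k c) h r) := by
  have hstep2 : ∀ (c' : Nat) (s2 : List (Nat × Nat)) (p : Nat × Nat) (y : Nat × Nat),
      y ∈ (if p.2 - p.1 > 1 && allFiveColA g c' p.1 p.2 then
            (List.range' (p.1 + 1) (p.2 - (p.1 + 1))).foldl (fun s r => PySem.Set.add s (r, c')) s2
          else s2) ↔
        y ∈ s2 ∨ ((p.2 - p.1 > 1 && allFiveColA g c' p.1 p.2) = true ∧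
          ∃ r' ∈ List.range' (p.1 + 1) (p.2 - (p.1 + 1)), y = (r', c')) := by
    intro c' s2 p y
    by_cases hc : (p.2 - p.1 > 1 && allFiveColA g c' p.1 p.2) = true
    · rw [if_pos hc, PySem.Set.mem_foldl_add]
      simp [hc]
    · rw [if_neg hc]
      simp [hc]
  have hstep1 : ∀ (s1 : List (Nat × Nat)) (c' : Nat) (y : Nat × Nat),
      y ∈ (let reds := (List.range h).filter (fun r => pvCell g r c' == 2)
           (reds.zip reds.tail).foldl (fun s p =>
             if p.2 - p.1 > 1 && allFiveColA g c' p.1 p.2 then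
               (List.range' (p.1 + 1) (p.2 - (p.1 + 1))).foldl (fun s r => PySem.Set.add s (r, c')) s
             else s) s1) ↔
        y ∈ s1 ∨ ∃ p ∈ (((List.range h).filter (fun r => pvCell g r c' == 2)).zip
            ((List.range h).filter (fun r => pvCell g r c' == 2)).tail),
          ((p.2 - p.1 > 1 && allFiveColA g c' p.1 p.2) = true ∧
            ∃ r' ∈ List.range' (p.1 + 1) (p.2 - (p.1 + 1)), y = (r', c')) := by
    intro s1 c' y
    exact mem_foldl_step _ _ (hstep2 c') _ s1 y
  unfold colFillsA
  rw [mem_foldl_step _ _ hstep1 (List.range w) s (r, c)]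
  constructor
  · rintro (hs | ⟨c', hc', p, hp, hcond, r', hr', heq⟩)
    · exact Or.inl hs
    · obtain ⟨rfl, rfl⟩ : r = r' ∧ c = c' :=
        ⟨congrArg Prod.fst heq, congrArg Prod.snd heq⟩
      exact Or.inr ⟨List.mem_range.mp hc',
        (lineFill_iff_exists_pair (fun k => pvCell g k c) h r).mpr ⟨p, hp, hcond, hr'⟩⟩
  · rintro (hs | ⟨hcw, hLF⟩)
    · exact Or.inl hs
    · obtain ⟨p, hp, hcond, hr'⟩ :=
        (lineFill_iff_exists_pair (fun k => pvCell g k c) h r).mp hLF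
      exact Or.inr ⟨c, List.mem_range.mpr hcw, p, hp, hcond, r, hr', rfl⟩

lemma mem_toFill_iff (g : List (List Int)) (h w r c : Nat) :
    (r, c) ∈ colFillsA g h w (rowFillsA g h w PySem.Set.empty) ↔
      (r < h ∧ LineFill (fun k => pvCell g r k) w c) ∨
      (c < w ∧ LineFill (fun k => pvCell g k c) h r) := by
  rw [mem_colFillsA, mem_rowFillsA]
  simp [PySem.Set.empty]

-- the apply loop, pointwise
lemma pvSetCell_length (g : List (List Int)) (r c : Nat) (v : Int) :
    (pvSetCell g r c v).length = g.length := by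
  simp [pvSetCell]

lemma pvSetCell_rowlen (g : List (List Int)) (a b : Nat) (v : Int) (r : Nat) :
    ((pvSetCell g a b v).getD r []).length = ((g.getD r []).length) := by
  unfold pvSetCell
  rw [List.getD_eq_getElem?_getD, List.getD_eq_getElem?_getD, List.getElem?_modify]
  cases h : g[r]? with
  | none => rfl
  | some row => by_cases har : a = r <;> simp [har, List.length_set]

lemma pvCell_pvSetCell_self {g : List (List Int)} {r c : Nat} (v : Int)
    (hr : r < g.length) (hc : c < (g.getD r []).length) :
    pvCell (pvSetCell g r c v) r c = v := by
  unfold pvCell pvSetCell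
  have hg : g[r]? = some g[r] := List.getElem?_eq_getElem hr
  have hc' : c < g[r].length := by
    rwa [List.getD_eq_getElem?_getD, hg] at hc
  simp only [List.getD_eq_getElem?_getD, List.getElem?_modify, hg]
  simp [hc']

lemma pvCell_pvSetCell_ne {g : List (List Int)} {a b r c : Nat} (v : Int)
    (hne : ¬(a = r ∧ b = c)) :
    pvCell (pvSetCell g a b v) r c = pvCell g r c := by
  unfold pvCell pvSetCell
  simp only [List.getD_eq_getElem?_getD, List.getElem?_modify]
  by_cases har : a = r
  · subst har
    have hbc : b ≠ c := fun h => hne ⟨rfl, h⟩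
    cases h : g[a]? with
    | none => simp
    | some row => simp [hbc]
  · simp [har]

def applyStep (out : List (List Int)) (p : Nat × Nat) : List (List Int) :=
  if pvCell out p.1 p.2 == 5 then pvSetCell out p.1 p.2 8 else out

lemma applyStep_length (out : List (List Int)) (p : Nat × Nat) :
    (applyStep out p).length = out.length := by
  unfold applyStep; split <;> simp [pvSetCell_length]

lemma applyStep_rowlen (out : List (List Int)) (p : Nat × Nat) (r : Nat) :
    ((applyStep out p).getD r []).length = ((out.getD r []).length) := by
  unfold applyStep; split
  · exact pvSetCell_rowlen out p.1 p.2 8 r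
  · rfl

lemma applyFold_length (L : List (Nat × Nat)) (out : List (List Int)) :
    (L.foldl applyStep out).length = out.length := by
  induction L generalizing out with
  | nil => rfl
  | cons p L ih => simp [List.foldl_cons, ih, applyStep_length]

lemma applyFold_rowlen (L : List (Nat × Nat)) (out : List (List Int)) (r : Nat) :
    ((L.foldl applyStep out).getD r []).length = ((out.getD r []).length) := by
  induction L generalizing out with
  | nil => rfl
  | cons p L ih => rw [List.foldl_cons, ih, applyStep_rowlen]

lemma applyFold_cell (L : List (Nat × Nat)) (out : List (List Int)) (r c : Nat)
    (hL : ∀ p ∈ L, p.1 < out.length ∧ p.2 < (out.getD p.1 []).length) :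
    pvCell (L.foldl applyStep out) r c =
      if (r, c) ∈ L then (if pvCell out r c = 5 then 8 else pvCell out r c)
      else pvCell out r c := by
  induction L generalizing out with
  | nil => simp
  | cons p L ih =>
    rw [List.foldl_cons]
    have hp := hL p List.mem_cons_self
    have hL' : ∀ q ∈ L, q.1 < (applyStep out p).length ∧
        q.2 < ((applyStep out p).getD q.1 []).length := by
      intro q hq
      rw [applyStep_length, applyStep_rowlen]
      exact hL q (List.mem_cons_of_mem _ hq)
    rw [ih (applyStep out p) hL']
    by_cases hpc : p = (r, c)
    · subst hpc
      have hcell : pvCell (applyStep out (r, c)) r c =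
          if pvCell out r c = 5 then 8 else pvCell out r c := by
        unfold applyStep
        by_cases h5 : pvCell out (r, c).1 (r, c).2 = 5
        · rw [if_pos (by simpa using h5), if_pos h5]
          exact pvCell_pvSetCell_self 8 hp.1 hp.2
        · rw [if_neg (by simpa using h5), if_neg h5]
      rw [hcell]
      by_cases hmem : (r, c) ∈ L <;> by_cases h5 : pvCell out r c = 5 <;>
        simp [hmem, h5]
    · have hcell : pvCell (applyStep out p) r c = pvCell out r c := by
        unfold applyStep
        split
        · exact pvCell_pvSetCell_ne 8 (fun h => hpc (by
            obtain ⟨h1, h2⟩ := h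
            exact Prod.ext h1 h2))
        · rfl
      rw [hcell]
      have hrp : ¬((r, c) = p) := fun h => hpc h.symm
      have hmem : ((r, c) ∈ p :: L) ↔ ((r, c) ∈ L) := by
        rw [List.mem_cons]
        exact ⟨fun h => h.resolve_left hrp, Or.inr⟩
      by_cases hm : (r, c) ∈ L <;> simp [hm, hmem]

-- bounds carried by LineFill
lemma lineFill_lt {f : Nat → Int} {n c : Nat} (h : LineFill f n c) : c < n := by
  obtain ⟨a, b, h1, h2, h3, -⟩ := h
  omega

lemma transform_eq_alt (grid : List (List Int)) (hpre : Pre_transform grid) :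
    transform grid = transform_alt grid := by
  cases grid with
  | nil => rfl
  | cons g0 gs =>
    by_cases h0 : g0.isEmpty
    · simp only [transform, transform_alt, if_pos h0]
    · have hpre' : ∀ r, r < (g0 :: gs).length → g0.length ≤ ((g0 :: gs).getD r []).length := by
        intro r hr
        have hm : (g0 :: gs)[r] ∈ (g0 :: gs) := List.getElem_mem hr
        have h1 := hpre _ hm
        rw [List.getD_eq_getElem?_getD, List.getElem?_eq_getElem hr]
        exact h1
      rw [show transform (g0 :: gs) =
            (colFillsA (g0 :: gs) (g0 :: gs).length g0.length
              (rowFillsA (g0 :: gs) (g0 :: gs).length g0.length PySem.Set.empty)).foldl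
              applyStep (g0 :: gs) from by
          simp only [transform, if_neg h0]; rfl,
        show transform_alt (g0 :: gs) =
            (List.range (g0 :: gs).length).map (fun r =>
              ((List.range g0.length).map (fun c =>
                if filledB (g0 :: gs) (g0 :: gs).length g0.length r c then 8
                else pvCell (g0 :: gs) r c)) ++ (((g0 :: gs).getD r []).drop g0.length)) from by
          simp only [transform_alt, if_neg h0]]
      set G : List (List Int) := g0 :: gs with hGdef
      set L : List (Nat × Nat) :=
        colFillsA G G.length g0.length (rowFillsA G G.length g0.length PySem.Set.empty) with hLdef
      have hmemL : ∀ r c : Nat, ((r, c) ∈ L) ↔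
          ((r < G.length ∧ LineFill (fun k => pvCell G r k) g0.length c) ∨
           (c < g0.length ∧ LineFill (fun k => pvCell G k c) G.length r)) := by
        intro r c
        exact mem_toFill_iff G G.length g0.length r c
      have hLmem : ∀ p ∈ L, p.1 < G.length ∧ p.2 < (G.getD p.1 []).length := by
        intro p hp
        have hm := (hmemL p.1 p.2).mp (by simpa using hp)
        have hbound : p.1 < G.length ∧ p.2 < g0.length := by
          rcases hm with ⟨hr, hLF⟩ | ⟨hc, hLF⟩
          · exact ⟨hr, lineFill_lt hLF⟩
          · exact ⟨lineFill_lt hLF, hc⟩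
        exact ⟨hbound.1, lt_of_lt_of_le hbound.2 (hpre' p.1 hbound.1)⟩
      have hlenX : (L.foldl applyStep G).length = G.length := applyFold_length L G
      apply List.ext_getElem?
      intro r
      by_cases hr : r < G.length
      · have hrX : r < (L.foldl applyStep G).length := by omega
        rw [List.getElem?_eq_getElem hrX, List.getElem?_map, List.getElem?_range hr]
        simp only [Option.map_some, Option.some.injEq]
        have hXr : (L.foldl applyStep G).getD r [] = (L.foldl applyStep G)[r] := by
          rw [List.getD_eq_getElem?_getD, List.getElem?_eq_getElem hrX]
          rfl
        have hrowlen : (L.foldl applyStep G)[r].length = (G.getD r []).length := by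
          rw [← hXr]; exact applyFold_rowlen L G r
        apply List.ext_getElem?
        intro c
        have hcellX : ∀ hcX : c < (L.foldl applyStep G)[r].length,
            (L.foldl applyStep G)[r][c] = pvCell (L.foldl applyStep G) r c := by
          intro hcX
          unfold pvCell
          rw [hXr, List.getD_eq_getElem?_getD, List.getElem?_eq_getElem hcX]
          rfl
        have hcells := applyFold_cell L G r c hLmem
        by_cases hcW : c < g0.length
        · have hc : c < (G.getD r []).length := lt_of_lt_of_le hcW (hpre' r hr)
          have hcX : c < (L.foldl applyStep G)[r].length := by omega
          rw [List.getElem?_eq_getElem hcX,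
            List.getElem?_append_left (by simpa using hcW),
            List.getElem?_map, List.getElem?_range hcW]
          simp only [Option.map_some, Option.some.injEq]
          rw [hcellX hcX, hcells]
          by_cases hf : filledB G G.length g0.length r c = true
          · have hLF := (filledB_iff G G.length g0.length r c).mp hf
            have hmem : (r, c) ∈ L := (hmemL r c).mpr (by
              rcases hLF with hl | hl
              · exact Or.inl ⟨hr, hl⟩
              · exact Or.inr ⟨hcW, hl⟩)
            have h5 : pvCell G r c = 5 := by
              rcases hLF with hl | hl
              · simpa using lineFill_cell5 hl
              · simpa using lineFill_cell5 hl
            rw [if_pos hmem, if_pos h5, if_pos hf]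
          · have hnm : (r, c) ∉ L := fun hm => hf ((filledB_iff G G.length g0.length r c).mpr (by
              rcases (hmemL r c).mp hm with ⟨-, hl⟩ | ⟨-, hl⟩
              · exact Or.inl hl
              · exact Or.inr hl))
            rw [if_neg hnm, if_neg hf]
        · by_cases hc : c < (G.getD r []).length
          · have hcX : c < (L.foldl applyStep G)[r].length := by omega
            rw [List.getElem?_eq_getElem hcX,
              List.getElem?_append_right (by simp; omega)]
            simp only [List.length_map, List.length_range]
            rw [List.getElem?_drop, show g0.length + (c - g0.length) = c from by omega,
              List.getElem?_eq_getElem hc]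
            simp only [Option.some.injEq]
            have hnm : (r, c) ∉ L := by
              intro hm
              rcases (hmemL r c).mp hm with ⟨-, hl⟩ | ⟨hcw, -⟩
              · exact hcW (lineFill_lt hl)
              · exact hcW hcw
            rw [hcellX hcX, hcells, if_neg hnm]
            unfold pvCell
            rw [List.getD_eq_getElem?_getD, List.getElem?_eq_getElem hc]
            rfl
          · rw [List.getElem?_eq_none (by omega),
              List.getElem?_eq_none (by
                simp only [List.length_append, List.length_map, List.length_range,
                  List.length_drop]
                omega)]
      · rw [List.getElem?_eq_none (by omega), List.getElem?_eq_none (by simp; omega)]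

-- ===== VERDICT (by name: the statement is the Claim_ definition above) =====
theorem transform_spec : Claim_equal_transform := by
  intro grid _hdom hpre
  unfold Spec_transform
  exact transform_eq_alt grid hpre
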